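-- pv_equiv track=rewrite | github.com/AmyLinck/FEA | topology.py | calculate_optimizers
-- ===== SOURCE A (Python) =====
-- def calculate_optimizers(d, factors):
--     optimizers = []
--     for v in range(d):
--         optimizer = []
--         for i, factor in enumerate(factors):
--             if v in factor:
--                 optimizer.append(i)
--         optimizers.append(optimizer)
--     return optimizers
-- ===== SOURCE B (Python) =====
-- def calculate_optimizers(d, factors):
--     # Invert the loop: one pass over factor memberships filling per-variable buckets.
--     n = max(d, 0)
--     buckets = [[] for _ in range(n)]
--     for i, factor in enumerate(factors):
--         seen = set()
--         for v in factor: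
--             if 0 <= v < n and v not in seen:
--                 seen.add(v)
--                 buckets[v].append(i)
--     return buckets
-- ===== Notes on version B (the rewrite author's own statement) =====
-- stated objective: faster
-- what changed: Instead of scanning every factor for every variable v in range(d), B makes a single pass over the factors, appending each factor index once into the bucket of every (in-range, deduplicated) variable it contains.
import Mathlib
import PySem

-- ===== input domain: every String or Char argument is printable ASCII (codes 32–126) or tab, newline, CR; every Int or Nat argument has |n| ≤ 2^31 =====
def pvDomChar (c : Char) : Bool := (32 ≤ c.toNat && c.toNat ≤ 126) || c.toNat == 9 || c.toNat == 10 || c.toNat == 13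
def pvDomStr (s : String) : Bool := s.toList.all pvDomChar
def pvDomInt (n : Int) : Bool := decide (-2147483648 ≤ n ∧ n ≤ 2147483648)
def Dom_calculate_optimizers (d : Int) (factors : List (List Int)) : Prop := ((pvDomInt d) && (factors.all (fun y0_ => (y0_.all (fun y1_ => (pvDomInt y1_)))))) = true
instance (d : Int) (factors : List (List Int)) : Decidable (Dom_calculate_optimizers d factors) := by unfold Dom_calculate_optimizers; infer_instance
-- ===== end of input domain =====

-- B inverts A's loops: a single pass over the factors fills per-variable bucket lists (O(d + total memberships) instead of a scan of all factors per variable); proved to return the same value.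

-- ===== PORT A =====
def calculate_optimizers (d : Int) (factors : List (List Int)) : List (List Int) :=
  (PySem.List.pyRange 0 d 1).foldl
    (fun optimizers v =>
      optimizers ++ [(PySem.List.enumerate factors).foldl
        (fun optimizer p => if v ∈ p.2 then optimizer ++ [p.1] else optimizer) []])
    []

-- ===== PORT B =====
-- one body-step of B's inner loop: 'if 0 <= v < n and v not in seen: seen.add(v); buckets[v].append(i)'
def pvStepB (n i : Int) (st : List (List Int) × PySem.Set Int) (v : Int) : List (List Int) × PySem.Set Int :=
  if 0 ≤ v ∧ v < n ∧ ¬ (PySem.Set.contains st.2 v = true) then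
    (PySem.List.pySetD st.1 v (PySem.List.pyGetD st.1 v [] ++ [i]), PySem.Set.add st.2 v)
  else st

def calculate_optimizers_alt (d : Int) (factors : List (List Int)) : List (List Int) :=
  let n := max d 0
  let buckets : List (List Int) := (PySem.List.pyRange 0 n 1).map (fun _ => [])
  (PySem.List.enumerate factors).foldl
    (fun buckets p => (p.2.foldl (pvStepB n p.1) (buckets, PySem.Set.empty)).1) buckets

-- ===== PRECONDITION & SPEC =====
def Spec_calculate_optimizers (d : Int) (factors : List (List Int)) (out : List (List Int)) : Prop := out = calculate_optimizers_alt d factors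
instance (d : Int) (factors : List (List Int)) (out : List (List Int)) : Decidable (Spec_calculate_optimizers d factors out) := by unfold Spec_calculate_optimizers; infer_instance

-- ===== CLAIM (what is proved, stated in full; the proofs are below) =====
def Claim_equal_calculate_optimizers : Prop := ∀ (d : Int) (factors : List (List Int)), Dom_calculate_optimizers d factors → Spec_calculate_optimizers d factors (calculate_optimizers d factors)

-- ===== LEMMAS AND PROOFS =====

-- A's inner loop as a function: indices (from start s) of the factors containing x
def pvIdxs (fs : List (List Int)) (s x : Int) : List Int :=
  (PySem.List.enumerate fs s).foldl (fun acc p => if x ∈ p.2 then acc ++ [p.1] else acc) []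

lemma pvIdxs_fold_acc (x : Int) (l : List (Int × List Int)) (acc : List Int) :
    l.foldl (fun acc p => if x ∈ p.2 then acc ++ [p.1] else acc) acc
      = acc ++ l.foldl (fun acc p => if x ∈ p.2 then acc ++ [p.1] else acc) [] := by
  induction l generalizing acc with
  | nil => simp
  | cons p l ih =>
    simp only [List.foldl_cons]
    rw [ih, ih (if x ∈ p.2 then [] ++ [p.1] else [])]
    split <;> simp

lemma pvIdxs_nil (s x : Int) : pvIdxs [] s x = [] := rfl

lemma pvIdxs_cons (f : List Int) (fs : List (List Int)) (s x : Int) :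
    pvIdxs (f :: fs) s x = (if x ∈ f then [s] else []) ++ pvIdxs fs (s + 1) x := by
  simp only [pvIdxs, PySem.List.enumerate_cons, List.foldl_cons]
  rw [pvIdxs_fold_acc]
  split <;> simp

lemma pvA_eq_map (d : Int) (factors : List (List Int)) :
    calculate_optimizers d factors
      = (PySem.List.pyRange 0 d 1).map (fun v => pvIdxs factors 0 v) := by
  unfold calculate_optimizers
  rw [PySem.List.foldl_append_singleton_eq_map]
  simp only [List.nil_append]
  rfl

-- effect of B's inner loop (over one factor) on each bucket
lemma pvInner (n i : Int) (f : List Int) :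
    ∀ (b : List (List Int)) (s : PySem.Set Int), (b.length : Int) = n →
      (f.foldl (pvStepB n i) (b, s)).1.length = b.length ∧
      ∀ k : Nat, k < b.length →
        PySem.List.pyGetD (f.foldl (pvStepB n i) (b, s)).1 (k : Int) []
          = if (k : Int) ∈ f ∧ ¬ ((k : Int) ∈ s) then PySem.List.pyGetD b (k : Int) [] ++ [i]
            else PySem.List.pyGetD b (k : Int) [] := by
  induction f with
  | nil => intro b s hb; simp
  | cons v f ih =>
    intro b s hb
    simp only [List.foldl_cons]
    by_cases h : 0 ≤ v ∧ v < n ∧ ¬ (PySem.Set.contains s v = true)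
    · obtain ⟨j, rfl⟩ : ∃ j : Nat, v = (j : Int) := ⟨v.toNat, by omega⟩
      obtain ⟨h1, h2, h3⟩ := h
      have hvs : ¬ (((j : Nat) : Int) ∈ s) := by
        intro hv; exact h3 (by simpa [PySem.Set.contains] using hv)
      have hstep : pvStepB n i (b, s) ((j : Nat) : Int)
          = (PySem.List.pySetD b (j : Int) (PySem.List.pyGetD b (j : Int) [] ++ [i]), PySem.Set.add s (j : Int)) := by
        simp only [pvStepB]
        rw [if_pos ⟨h1, h2, h3⟩]
      rw [hstep]
      have hjlt : j < b.length := by omega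
      have hlen : ((PySem.List.pySetD b (j : Int) (PySem.List.pyGetD b (j : Int) [] ++ [i])).length : Int) = n := by
        rw [PySem.List.length_pySetD]; exact hb
      obtain ⟨ihlen, ihget⟩ := ih _ (PySem.Set.add s (j : Int)) hlen
      rw [PySem.List.length_pySetD] at ihlen
      refine ⟨ihlen, ?_⟩
      intro k hk
      rw [ihget k (by rwa [PySem.List.length_pySetD])]
      have hget' := PySem.List.pyGetD_pySetD_natCast b j k (PySem.List.pyGetD b (j : Int) [] ++ [i]) [] hjlt
      rw [hget']
      by_cases hkv : k = j
      · subst hkv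
        simp [hvs]
      · have hkv' : ¬ (((k : Nat) : Int) = (j : Int)) := by exact_mod_cast hkv
        have hmem : ((k : Nat) : Int) ∈ PySem.Set.add s (j : Int) ↔ ((k : Nat) : Int) ∈ s := by
          rw [PySem.Set.mem_add]; simp [hkv']
        simp [hkv, hkv', hmem]
    · have hstep : pvStepB n i (b, s) v = (b, s) := by
        simp only [pvStepB]; rw [if_neg h]
      rw [hstep]
      obtain ⟨ihlen, ihget⟩ := ih b s hb
      refine ⟨ihlen, ?_⟩
      intro k hk
      rw [ihget k hk]
      by_cases hkv : (k : Int) = v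
      · -- k is in range, so v in range; hence the reason the step did not fire is v ∈ s
        have hvr : 0 ≤ v ∧ v < n := by constructor <;> omega
        have hvs : v ∈ s := by
          by_contra hns
          refine h ⟨hvr.1, hvr.2, ?_⟩
          simpa [PySem.Set.contains] using hns
        simp [hkv, hvs]
      · simp [hkv]

-- effect of B's outer loop starting from any bucket list
lemma pvOuter (n : Int) (fs : List (List Int)) :
    ∀ (s : Int) (b : List (List Int)), (b.length : Int) = n →
      ((PySem.List.enumerate fs s).foldl
          (fun b p => (p.2.foldl (pvStepB n p.1) (b, PySem.Set.empty)).1) b).length = b.length ∧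
      ∀ k : Nat, k < b.length →
        PySem.List.pyGetD
            ((PySem.List.enumerate fs s).foldl
              (fun b p => (p.2.foldl (pvStepB n p.1) (b, PySem.Set.empty)).1) b) (k : Int) []
          = PySem.List.pyGetD b (k : Int) [] ++ pvIdxs fs s (k : Int) := by
  induction fs with
  | nil => intro s b hb; simp [pvIdxs_nil]
  | cons f fs ih =>
    intro s b hb
    simp only [PySem.List.enumerate_cons, List.foldl_cons]
    obtain ⟨ilen, iget⟩ := pvInner n s f b PySem.Set.empty hb
    obtain ⟨olen, oget⟩ := ih (s + 1) _ (by rw [ilen]; exact hb)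
    rw [ilen] at olen oget
    refine ⟨olen, ?_⟩
    intro k hk
    rw [oget k hk, iget k hk, pvIdxs_cons]
    have : ¬ ((k : Int) ∈ PySem.Set.empty) := by simp [PySem.Set.empty]
    by_cases hkf : (k : Int) ∈ f <;> simp [hkf, List.append_assoc]

-- ===== VERDICT (by name: the statement is the Claim_ definition above) =====
theorem calculate_optimizers_spec : Claim_equal_calculate_optimizers := by
  intro d factors _
  unfold Spec_calculate_optimizers
  rw [pvA_eq_map]
  unfold calculate_optimizers_alt
  simp only []
  set n := max d 0 with hn
  set b0 : List (List Int) := (PySem.List.pyRange 0 n 1).map (fun _ => []) with hb0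
  have hb0len : b0.length = n.toNat := by
    simp [hb0, PySem.List.length_pyRange_one]
  have hb0n : (b0.length : Int) = n := by rw [hb0len]; omega
  obtain ⟨olen, oget⟩ := pvOuter n factors 0 b0 hb0n
  apply List.ext_getElem
  · rw [olen, hb0len, List.length_map, PySem.List.length_pyRange_one]
    omega
  · intro k h1 h2
    have hk : k < b0.length := by rwa [olen] at h2
    have hkd : (k : Int) < d := by
      rw [List.length_map, PySem.List.length_pyRange_one] at h1; omega
    have hA : ((PySem.List.pyRange 0 d 1).map (fun v => pvIdxs factors 0 v))[k]
        = pvIdxs factors 0 (k : Int) := by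
      rw [List.getElem_map, PySem.List.getElem_pyRange_one]
      simp
    rw [hA]
    have hget := oget k hk
    have hb0k : PySem.List.pyGetD b0 (k : Int) [] = [] := by
      rw [hb0]
      rw [PySem.List.pyGetD_map_pyRange_of_nonneg _ _ _ _ (by omega) (by omega)]
    rw [hb0k] at hget
    have hr := PySem.List.pyGetD_eq_getElem
      (i := (k : Int))
      ((PySem.List.enumerate factors).foldl
        (fun b p => (p.2.foldl (pvStepB n p.1) (b, PySem.Set.empty)).1) b0) []
      (by omega) (by rw [olen]; exact_mod_cast hk)
    simp only [Int.toNat_natCast] at hr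
    rw [← hr, hget]
    simp
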